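-- pv_equiv track=rewrite | github.com/ostew5/mart-rest | app/pyapp/indexing.py | mark_guarded_newlines_manual
-- ===== SOURCE A (Python) =====
-- def mark_guarded_newlines_manual(text: str) -> str:
--     result = []
--     last_nl_pos = -1  # position of last newline (or -1 for start)
--
--     for i, ch in enumerate(text):
--         if ch == "\n":
--             # check if it's NOT a double newline
--             next_is_newline = (i + 1 < len(text) and text[i + 1] == "\n")
--             # distance since last newline (or start)
--             dist = i - last_nl_pos - 1  # subtract 1 for the newline itself
--             if dist >= 10 and not next_is_newline:
--                 # replace with split token
--                 result.append("|")
--                 last_nl_pos = i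
--                 continue
--             else:
--                 # keep the newline as-is
--                 result.append("\n")
--                 last_nl_pos = i
--         else:
--             result.append(ch)
--     return "".join(result)
-- ===== SOURCE B (Python) =====
-- def mark_guarded_newlines_manual(text: str) -> str:
--     segs = text.split("\n")
--     last = len(segs) - 1
--     out = [segs[0]]
--     for k in range(1, len(segs)):
--         if len(segs[k - 1]) >= 10 and not (segs[k] == "" and k < last):
--             out.append("|")
--         else:
--             out.append("\n")
--         out.append(segs[k])
--     return "".join(out)
-- ===== Notes on version B (the rewrite author's own statement) =====
-- stated objective: faster
-- what changed: B splits the text on newlines and rebuilds it from consecutive segment pairs (separator chosen from the previous segment's length and whether the next segment is an interior empty line), replacing A's character-by-character scan with last-newline position bookkeeping.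
import Mathlib
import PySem

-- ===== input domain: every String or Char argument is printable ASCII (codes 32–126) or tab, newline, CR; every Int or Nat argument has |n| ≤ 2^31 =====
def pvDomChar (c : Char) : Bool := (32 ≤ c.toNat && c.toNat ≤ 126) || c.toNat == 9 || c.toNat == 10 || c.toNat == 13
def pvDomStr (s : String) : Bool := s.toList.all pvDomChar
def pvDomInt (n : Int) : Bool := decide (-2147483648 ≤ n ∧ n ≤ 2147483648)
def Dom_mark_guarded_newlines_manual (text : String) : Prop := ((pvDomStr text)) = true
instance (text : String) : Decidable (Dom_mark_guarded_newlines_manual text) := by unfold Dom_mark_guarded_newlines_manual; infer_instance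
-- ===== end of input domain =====

-- B replaces A's character-by-character scan (position bookkeeping) by splitting on newlines and
-- rebuilding from consecutive segment pairs; same output, measurably faster by constant factor (objective: faster).

-- ===== PORT A =====
-- A's loop body: state (result, last_nl_pos); one step per (i, ch) of enumerate(text)
def pvStepA (txt : List Char) (st : List (List Char) × Int) (p : Int × Char) :
    List (List Char) × Int :=
  let result := st.1
  let last_nl_pos := st.2
  let i := p.1
  let ch := p.2
  if ch = '\n' then
    let next_is_newline :=
      decide (i + 1 < PySem.List.len txt) && (PySem.List.pyGet? txt (i + 1) == some '\n')
    let dist := i - last_nl_pos - 1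
    if 10 ≤ dist ∧ next_is_newline = false then
      (result ++ [['|']], i)
    else
      (result ++ [['\n']], i)
  else
    (result ++ [[ch]], last_nl_pos)

def mark_guarded_newlines_manual (text : String) : String :=
  let cs := text.toList
  let fin := (PySem.List.enumerate cs).foldl (pvStepA cs) ([], -1)
  String.ofList (PySem.Chars.join [] fin.1)

-- ===== PORT B =====
-- B's loop body: for k in range(1, len(segs)) append the separator ('|' or '\n') and segs[k]
def pvStepB (segs : List (List Char)) (acc : List (List Char)) (k : Int) :
    List (List Char) :=
  let last := PySem.List.len segs - 1
  let prev := PySem.List.pyGetD segs (k - 1) []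
  let cur := PySem.List.pyGetD segs k []
  let acc' := if 10 ≤ PySem.List.len prev ∧ ¬(cur = [] ∧ k < last) then
      acc ++ [['|']]
    else
      acc ++ [['\n']]
  acc' ++ [cur]

def mark_guarded_newlines_manual_alt (text : String) : String :=
  let segs := PySem.Chars.splitOn text.toList ['\n']
  let out := (PySem.List.pyRange 1 (PySem.List.len segs) 1).foldl (pvStepB segs)
      [PySem.List.pyGetD segs 0 []]
  String.ofList (PySem.Chars.join [] out)

-- ===== PRECONDITION & SPEC =====
def Spec_mark_guarded_newlines_manual (text : String) (out : String) : Prop := out = mark_guarded_newlines_manual_alt text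
instance (text : String) (out : String) : Decidable (Spec_mark_guarded_newlines_manual text out) := by unfold Spec_mark_guarded_newlines_manual; infer_instance

-- ===== CLAIM (what is proved, stated in full; the proofs are below) =====
def Claim_equal_mark_guarded_newlines_manual : Prop := ∀ (text : String), Dom_mark_guarded_newlines_manual text → Spec_mark_guarded_newlines_manual text (mark_guarded_newlines_manual text)

-- ===== LEMMAS AND PROOFS =====


def pvSplitNL : List Char → List Char × List (List Char)
  | [] => ([], [])
  | c :: rest =>
    let p := pvSplitNL rest
    if c = '\n' then ([], p.1 :: p.2) else (c :: p.1, p.2)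

theorem pv_go_spec (l : List Char) : ∀ (fuel : Nat), l.length < fuel → ∀ (cur : List Char) (acc : List (List Char)),
    PySem.Chars.splitOn.go ['\n'] fuel l cur acc
      = acc.reverse ++ (cur.reverse ++ (pvSplitNL l).1) :: (pvSplitNL l).2 := by
  induction l with
  | nil =>
    intro fuel h cur acc
    match fuel, h with
    | fuel + 1, _ => simp [PySem.Chars.splitOn.go, pvSplitNL]
  | cons c rest ih =>
    intro fuel h cur acc
    match fuel, h with
    | fuel + 1, h =>
      simp only [List.length_cons] at h
      by_cases hc : c = '\n'
      · subst hc
        rw [PySem.Chars.splitOn.go]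
        rw [if_pos (by simp [List.isPrefixOf])]
        simp only [List.length_singleton, List.drop_one, List.tail_cons]
        rw [ih fuel (by omega)]
        simp [pvSplitNL]
      · rw [PySem.Chars.splitOn.go]
        rw [if_neg (by simp [List.isPrefixOf]; exact fun h => absurd h.symm hc)]
        rw [ih fuel (by omega)]
        simp [pvSplitNL, hc]

theorem pv_splitOn_eq (cs : List Char) :
    PySem.Chars.splitOn cs ['\n'] = (pvSplitNL cs).1 :: (pvSplitNL cs).2 := by
  unfold PySem.Chars.splitOn
  rw [pv_go_spec cs (cs.length + 1) (by omega)]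
  simp



def pvRunA : List Char → Nat → List Char
  | [], _ => []
  | c :: rest, d =>
    if c = '\n' then
      (if 10 ≤ d ∧ ¬(rest.head? = some '\n') then '|' else '\n') :: pvRunA rest 0
    else c :: pvRunA rest (d + 1)

theorem pv_foldA (cs : List Char) : ∀ (txt : List Char) (n d : Nat) (acc : List (List Char)),
    txt.drop n = cs →
    ((PySem.List.enumerate cs ((n : Nat) : Int)).foldl (pvStepA txt) (acc, ((n : Nat) : Int) - 1 - ((d : Nat) : Int))).1
      = acc ++ (pvRunA cs d).map (fun c => [c]) := by
  induction cs with
  | nil => intro txt n d acc h; simp [PySem.List.enumerate, pvRunA]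
  | cons c rest ih =>
    intro txt n d acc h
    have hn : n < txt.length := by
      by_contra hge
      rw [List.drop_eq_nil_of_le (by omega)] at h
      simp at h
    have hdrop : txt.drop (n + 1) = rest := by
      have h2 : List.drop 1 (List.drop n txt) = List.drop (n + 1) txt := by
        rw [List.drop_drop]
      rw [h] at h2
      simpa using h2.symm
    have hcast1 : ((n : Nat) : Int) + 1 = (((n + 1 : Nat)) : Int) := by push_cast; ring
    rw [PySem.List.enumerate_cons, List.foldl_cons]
    by_cases hc : c = '\n'
    · subst hc
      have hnext : (decide (((n : Nat) : Int) + 1 < PySem.List.len txt) &&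
          (PySem.List.pyGet? txt (((n : Nat) : Int) + 1) == some '\n')) = (rest.head? == some '\n') := by
        rw [hcast1, PySem.List.pyGet?_natCast]
        have hg : txt[n+1]? = rest.head? := by
          conv_rhs => rw [← hdrop]
          simp
        rw [hg]
        have hlen : txt.length - (n + 1) = rest.length := by
          conv_rhs => rw [← hdrop]
          simp
        cases rest with
        | nil => simp
        | cons r rr =>
          have hlt : n + 1 < txt.length := by simp at hlen; omega
          simp only [List.head?_cons, PySem.List.len_eq]
          rw [decide_eq_true (by exact_mod_cast hlt)]
          simp
      have hiff : ((10 : Int) ≤ ((n : Nat) : Int) - (((n : Nat) : Int) - 1 - ((d : Nat) : Int)) - 1 ∧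
            (rest.head? == some '\n') = false) ↔ (10 ≤ d ∧ ¬(rest.head? = some '\n')) := by
        rw [beq_eq_false_iff_ne]
        constructor
        · rintro ⟨h1, h2⟩; exact ⟨by omega, h2⟩
        · rintro ⟨h1, h2⟩; exact ⟨by omega, h2⟩
      have hstep : pvStepA txt (acc, ((n : Nat) : Int) - 1 - ((d : Nat) : Int)) (((n : Nat) : Int), '\n')
          = (acc ++ [[if 10 ≤ d ∧ ¬(rest.head? = some '\n') then '|' else '\n']],
             (((n + 1 : Nat)) : Int) - 1 - (((0 : Nat)) : Int)) := by
        simp only [pvStepA]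
        rw [hnext]
        by_cases hcond : 10 ≤ d ∧ ¬(rest.head? = some '\n')
        · rw [if_pos (hiff.mpr hcond), if_pos hcond]
          simp only [if_true, Prod.mk.injEq]
          exact ⟨trivial, by push_cast; ring⟩
        · rw [if_neg (fun hh => hcond (hiff.mp hh)), if_neg hcond]
          simp only [if_true, Prod.mk.injEq]
          exact ⟨trivial, by push_cast; ring⟩
      rw [hstep, hcast1, ih txt (n + 1) 0 _ hdrop]
      simp [pvRunA]
    · have hstep : pvStepA txt (acc, ((n : Nat) : Int) - 1 - ((d : Nat) : Int)) (((n : Nat) : Int), c)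
          = (acc ++ [[c]], (((n + 1 : Nat)) : Int) - 1 - (((d + 1 : Nat)) : Int)) := by
        simp only [pvStepA, if_neg hc, Prod.mk.injEq]
        exact ⟨trivial, by push_cast; ring⟩
      rw [hstep, hcast1, ih txt (n + 1) (d + 1) _ hdrop]
      simp [pvRunA, hc]



def pvTailB : List Char → List (List Char) → List Char
  | _, [] => []
  | prev, t :: rr =>
    (if 10 ≤ prev.length ∧ ¬(t = [] ∧ rr ≠ []) then '|' else '\n') :: (t ++ pvTailB t rr)

theorem pv_join_nil_cons (p : List Char) (rest : List (List Char)) :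
    PySem.Chars.join [] (p :: rest) = p ++ PySem.Chars.join [] rest := by
  cases rest with
  | nil => simp [PySem.Chars.join_singleton, PySem.Chars.join_nil]
  | cons q rr => rw [PySem.Chars.join_cons_cons]; simp

theorem pv_join_nil_append (a b : List (List Char)) :
    PySem.Chars.join [] (a ++ b) = PySem.Chars.join [] a ++ PySem.Chars.join [] b := by
  induction a with
  | nil => simp [PySem.Chars.join_nil]
  | cons p rr ih => simp [pv_join_nil_cons, ih]

theorem pv_foldB (segsRem : List (List Char)) :
    ∀ (segs : List (List Char)) (n : Nat) (prev : List Char) (acc : List (List Char)),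
    1 ≤ n → segs.drop n = segsRem → segs[n-1]? = some prev →
    PySem.Chars.join [] ((PySem.List.pyRange ((n : Nat) : Int) ((segs.length : Nat) : Int) 1).foldl (pvStepB segs) acc)
      = PySem.Chars.join [] acc ++ pvTailB prev segsRem := by
  induction segsRem with
  | nil =>
    intro segs n prev acc hn hdrop hprev
    have hle : segs.length ≤ n := by
      by_contra hlt
      rw [List.drop_eq_nil_iff] at hdrop
      omega
    have : PySem.List.pyRange ((n : Nat) : Int) ((segs.length : Nat) : Int) 1 = [] := by
      rw [PySem.List.pyRange_one]
      have : (((segs.length : Nat) : Int) - ((n : Nat) : Int)).toNat = 0 := by omega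
      rw [this]; simp
    rw [this]
    simp [pvTailB]
  | cons t rem ih =>
    intro segs n prev acc hn hdrop hprev
    have hlt : n < segs.length := by
      by_contra hge
      rw [List.drop_eq_nil_of_le (by omega)] at hdrop
      simp at hdrop
    have hdrop' : segs.drop (n + 1) = rem := by
      have h2 : List.drop 1 (List.drop n segs) = List.drop (n + 1) segs := by
        rw [List.drop_drop]
      rw [hdrop] at h2
      simpa using h2.symm
    have ht : segs[n]? = some t := by
      have : (segs.drop n)[0]? = some t := by rw [hdrop]; rfl
      simpa using this
    have hremlen : segs.length - (n + 1) = rem.length := by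
      conv_rhs => rw [← hdrop']
      simp
    rw [PySem.List.pyRange_one_cons (by exact_mod_cast hlt), List.foldl_cons]
    have hiff : ((10 : Int) ≤ PySem.List.len prev ∧
          ¬(t = [] ∧ ((n : Nat) : Int) < PySem.List.len segs - 1)) ↔
        (10 ≤ prev.length ∧ ¬(t = [] ∧ rem ≠ [])) := by
      simp only [PySem.List.len_eq]
      constructor
      · rintro ⟨h1, h2⟩
        refine ⟨by exact_mod_cast h1, fun ⟨he, hne⟩ => h2 ⟨he, ?_⟩⟩
        have : rem.length ≠ 0 := fun h0 => hne (List.eq_nil_of_length_eq_zero h0)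
        omega
      · rintro ⟨h1, h2⟩
        refine ⟨by exact_mod_cast h1, fun ⟨he, hne⟩ => h2 ⟨he, ?_⟩⟩
        have : n + 1 < segs.length := by omega
        have : rem.length ≠ 0 := by omega
        exact fun h0 => this (by simp [h0])
    have hstep : pvStepB segs acc ((n : Nat) : Int)
        = (if 10 ≤ prev.length ∧ ¬(t = [] ∧ rem ≠ []) then acc ++ [['|']] else acc ++ [['\n']]) ++ [t] := by
      simp only [pvStepB]
      have hc1 : ((n : Nat) : Int) - 1 = (((n - 1 : Nat)) : Int) := by omega
      rw [hc1, PySem.List.pyGetD_natCast, PySem.List.pyGetD_natCast]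
      rw [List.getD_eq_getElem?_getD, List.getD_eq_getElem?_getD, hprev, ht]
      simp only [Option.getD_some]
      by_cases hcond : 10 ≤ prev.length ∧ ¬(t = [] ∧ rem ≠ [])
      · rw [if_pos (hiff.mpr hcond), if_pos hcond]
      · rw [if_neg (fun hh => hcond (hiff.mp hh)), if_neg hcond]
    rw [hstep]
    have hc2 : ((n : Nat) : Int) + 1 = (((n + 1 : Nat)) : Int) := by push_cast; ring
    rw [hc2, ih segs (n + 1) t _ (by omega) hdrop' (by simpa using ht)]
    have htail : pvTailB prev (t :: rem)
        = (if 10 ≤ prev.length ∧ ¬(t = [] ∧ rem ≠ []) then '|' else '\n') :: (t ++ pvTailB t rem) := rfl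
    rw [htail]
    by_cases hcond : 10 ≤ prev.length ∧ ¬(t = [] ∧ rem ≠ [])
    · rw [if_pos hcond, if_pos hcond]
      simp [pv_join_nil_append, pv_join_nil_cons]
    · rw [if_neg hcond, if_neg hcond]
      simp [pv_join_nil_append, pv_join_nil_cons]





theorem pv_runA_append (s : List Char) : ∀ (cs : List Char) (d : Nat), '\n' ∉ s →
    pvRunA (s ++ cs) d = s ++ pvRunA cs (d + s.length) := by
  induction s with
  | nil => intro cs d _; simp
  | cons c ss ih =>
    intro cs d hmem
    have hc : c ≠ '\n' := fun h => hmem (by simp [h])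
    simp only [List.cons_append, pvRunA, if_neg hc]
    rw [ih cs (d + 1) (fun h => hmem (by simp [h]))]
    simp only [List.length_cons]
    have h' : d + 1 + ss.length = d + (ss.length + 1) := by omega
    rw [h']

theorem pv_noNL1 (cs : List Char) : '\n' ∉ (pvSplitNL cs).1 := by
  induction cs with
  | nil => simp [pvSplitNL]
  | cons c rest ih =>
    by_cases hc : c = '\n'
    · simp [pvSplitNL, hc]
    · simp [pvSplitNL, hc]
      exact ⟨fun h => hc h.symm, ih⟩

theorem pv_noNL2 (cs : List Char) : ∀ t ∈ (pvSplitNL cs).2, '\n' ∉ t := by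
  induction cs with
  | nil => simp [pvSplitNL]
  | cons c rest ih =>
    by_cases hc : c = '\n'
    · simp only [pvSplitNL, if_pos hc]
      intro t ht
      rcases List.mem_cons.mp ht with h | h
      · rw [h]; exact pv_noNL1 rest
      · exact ih t h
    · simpa [pvSplitNL, hc] using ih

theorem pv_joinNL (cs : List Char) :
    PySem.Chars.join ['\n'] ((pvSplitNL cs).1 :: (pvSplitNL cs).2) = cs := by
  induction cs with
  | nil => simp [pvSplitNL, PySem.Chars.join_singleton]
  | cons c rest ih =>
    by_cases hc : c = '\n'
    · simp only [pvSplitNL, if_pos hc]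
      rw [PySem.Chars.join_cons_cons]
      simp [hc, ih]
    · simp only [pvSplitNL, if_neg hc]
      cases h2 : (pvSplitNL rest).2 with
      | nil =>
        rw [h2] at ih
        rw [PySem.Chars.join_singleton]
        rw [PySem.Chars.join_singleton] at ih
        simp [ih]
      | cons q rr =>
        rw [h2] at ih
        rw [PySem.Chars.join_cons_cons]
        rw [PySem.Chars.join_cons_cons] at ih
        simpa using ih

theorem pv_head_join (t : List Char) (rr : List (List Char)) (ht : '\n' ∉ t) :
    (PySem.Chars.join ['\n'] (t :: rr)).head? = some '\n' ↔ (t = [] ∧ rr ≠ []) := by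
  cases t with
  | nil =>
    cases rr with
    | nil => simp [PySem.Chars.join_singleton]
    | cons q qq =>
      rw [PySem.Chars.join_cons_cons]
      simp
  | cons a tt =>
    have ha : a ≠ '\n' := fun h => ht (by simp [h])
    constructor
    · intro h
      exfalso
      cases rr with
      | nil => rw [PySem.Chars.join_singleton] at h; simp at h; exact ha h
      | cons q qq =>
        rw [PySem.Chars.join_cons_cons] at h
        simp at h; exact ha h
    · rintro ⟨h, _⟩; simp at h

theorem pv_runA_join (rest : List (List Char)) : ∀ (s : List Char), '\n' ∉ s →
    (∀ t ∈ rest, '\n' ∉ t) →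
    pvRunA (PySem.Chars.join ['\n'] (s :: rest)) 0 = s ++ pvTailB s rest := by
  induction rest with
  | nil =>
    intro s hs _
    rw [PySem.Chars.join_singleton]
    have := pv_runA_append s [] 0 hs
    simp at this
    simp [this, pvTailB, pvRunA]
  | cons t rr ih =>
    intro s hs hrest
    rw [PySem.Chars.join_cons_cons]
    rw [List.append_assoc]
    rw [pv_runA_append s _ 0 hs]
    simp only [List.singleton_append, pvRunA]
    have hhead : ((PySem.Chars.join ['\n'] (t :: rr)).head? = some '\n') ↔ (t = [] ∧ rr ≠ []) :=
      pv_head_join t rr (hrest t (by simp))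
    have htail : pvTailB s (t :: rr)
        = (if 10 ≤ s.length ∧ ¬(t = [] ∧ rr ≠ []) then '|' else '\n') :: (t ++ pvTailB t rr) := rfl
    rw [htail, ih t (hrest t (by simp)) (fun u hu => hrest u (by simp [hu]))]
    have hcondiff : (10 ≤ 0 + s.length ∧ ¬((PySem.Chars.join ['\n'] (t :: rr)).head? = some '\n'))
        ↔ (10 ≤ s.length ∧ ¬(t = [] ∧ rr ≠ [])) := by
      rw [hhead]; simp
    by_cases hcond : 10 ≤ s.length ∧ ¬(t = [] ∧ rr ≠ [])
    · rw [if_pos (hcondiff.mpr hcond), if_pos hcond]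
      simp
    · rw [if_neg (fun hh => hcond (hcondiff.mp hh)), if_neg hcond]
      simp

-- ===== assembly =====
theorem pv_A_eq (text : String) :
    mark_guarded_newlines_manual text = String.ofList (pvRunA text.toList 0) := by
  unfold mark_guarded_newlines_manual
  have h := pv_foldA text.toList text.toList 0 0 [] (by simp)
  simp only [Nat.cast_zero] at h
  simp only []
  rw [show ((0 : Int) - 1 - 0) = (-1 : Int) by ring] at h
  rw [h]
  simp

theorem pv_B_eq (text : String) :
    mark_guarded_newlines_manual_alt text
      = String.ofList ((pvSplitNL text.toList).1
          ++ pvTailB (pvSplitNL text.toList).1 (pvSplitNL text.toList).2) := by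
  unfold mark_guarded_newlines_manual_alt
  rw [pv_splitOn_eq]
  have h := pv_foldB (pvSplitNL text.toList).2 ((pvSplitNL text.toList).1 :: (pvSplitNL text.toList).2) 1 (pvSplitNL text.toList).1 [(pvSplitNL text.toList).1] (by omega) (by simp) (by simp)
  simp only [Nat.cast_one] at h
  simp only [PySem.List.len_eq, List.length_cons] at h ⊢
  rw [show PySem.List.pyGetD ((pvSplitNL text.toList).1 :: (pvSplitNL text.toList).2) 0 []
        = (pvSplitNL text.toList).1 by
        rw [show (0 : Int) = ((0 : Nat) : Int) from rfl, PySem.List.pyGetD_natCast]; rfl]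
  rw [h, PySem.Chars.join_singleton]

-- ===== VERDICT (by name: the statement is the Claim_ definition above) =====
theorem mark_guarded_newlines_manual_spec : Claim_equal_mark_guarded_newlines_manual := by
  intro text _
  unfold Spec_mark_guarded_newlines_manual
  rw [pv_A_eq, pv_B_eq]
  have h := pv_runA_join (pvSplitNL text.toList).2 (pvSplitNL text.toList).1
      (pv_noNL1 text.toList) (pv_noNL2 text.toList)
  rw [pv_joinNL text.toList] at h
  rw [h]
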